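-- pv_equiv track=rewrite | github.com/KatWee/Multiview | Draw2D.py | SortDept
-- ===== SOURCE A (Python) =====
-- def SortDept (min, max, d,surface) :
--     dept = max
--     sort = []
--     while dept >= min :
--         for plane in surface :
--             if plane[0][d] == dept :
--                 sort.append(plane)
--         dept -= 1
--
--     return sort
-- ===== SOURCE B (Python) =====
-- def SortDept(min, max, d, surface):
--     if max < min:
--         return []
--     buckets = {}
--     for plane in surface:
--         buckets.setdefault(plane[0][d], []).append(plane)
--     sort = []
--     dept = max
--     while dept >= min:
--         sort.extend(buckets.get(dept, []))
--         dept -= 1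
--     return sort
-- ===== Notes on version B (the rewrite author's own statement) =====
-- stated objective: alternative
-- what changed: Instead of rescanning the whole surface list once per dept value, B builds a dict of buckets keyed by plane[0][d] in one pass and then walks dept from max down to min extending the result with each bucket.
import Mathlib
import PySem

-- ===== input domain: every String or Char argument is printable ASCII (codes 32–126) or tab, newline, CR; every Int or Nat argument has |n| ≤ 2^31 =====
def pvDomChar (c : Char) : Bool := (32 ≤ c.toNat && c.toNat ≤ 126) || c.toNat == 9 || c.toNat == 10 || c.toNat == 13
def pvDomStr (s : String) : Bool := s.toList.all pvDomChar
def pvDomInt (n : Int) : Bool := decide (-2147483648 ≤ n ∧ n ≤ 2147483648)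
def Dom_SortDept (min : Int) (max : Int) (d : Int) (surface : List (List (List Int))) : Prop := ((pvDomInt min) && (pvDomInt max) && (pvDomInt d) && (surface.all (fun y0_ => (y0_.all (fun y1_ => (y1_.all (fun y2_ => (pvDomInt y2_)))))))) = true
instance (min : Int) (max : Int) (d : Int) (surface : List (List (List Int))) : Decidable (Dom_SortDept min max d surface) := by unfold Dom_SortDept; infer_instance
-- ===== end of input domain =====

-- One honest line: B replaces A's repeated full scans of `surface` (one per dept value) with a
-- single bucket-building pass over `surface` plus a walk down the dept range (objective: alternative).

-- plane[0][d] as an Option (none exactly where Python raises IndexError); used by both ports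
def pvKey_SortDept (d : Int) (plane : List (List Int)) : Option Int :=
  (PySem.List.pyGet? plane 0).bind (fun p0 => PySem.List.pyGet? p0 d)

-- ===== PORT A =====
-- the while-loop of A: fuel = number of remaining dept values; inner for-loop is a foldl appending matches
def SortDeptLoopA (d : Int) (surface : List (List (List Int))) (dept : Int) (fuel : Nat)
    (sort : List (List (List Int))) : List (List (List Int)) :=
  match fuel with
  | 0 => sort
  | Nat.succ f =>
      SortDeptLoopA d surface (dept - 1) f
        (surface.foldl (fun acc plane =>
          if pvKey_SortDept d plane == some dept then acc ++ [plane] else acc) sort)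

def SortDept (min : Int) (max : Int) (d : Int) (surface : List (List (List Int))) : List (List (List Int)) :=
  SortDeptLoopA d surface max (max - min + 1).toNat []

-- ===== PORT B =====
-- bucket index: key = plane[0][d]; setdefault(...).append(plane) = modify key [] (· ++ [plane])
def SortDeptBuckets (d : Int) (surface : List (List (List Int))) :
    PySem.Dict Int (List (List (List Int))) :=
  surface.foldl (fun buckets plane =>
    match pvKey_SortDept d plane with
    | some k => buckets.modify k [] (· ++ [plane])
    | none => buckets) PySem.Dict.empty

def SortDeptLoopB (buckets : PySem.Dict Int (List (List (List Int)))) (dept : Int) (fuel : Nat)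
    (sort : List (List (List Int))) : List (List (List Int)) :=
  match fuel with
  | 0 => sort
  | Nat.succ f => SortDeptLoopB buckets (dept - 1) f (sort ++ buckets.getD dept [])

def SortDept_alt (min : Int) (max : Int) (d : Int) (surface : List (List (List Int))) : List (List (List Int)) :=
  if max < min then []
  else SortDeptLoopB (SortDeptBuckets d surface) max (max - min + 1).toNat []

-- ===== PRECONDITION & SPEC =====
-- Pre_ excludes exactly the inputs where Python A raises IndexError: when the loop body runs
-- (min ≤ max), every plane must be nonempty with d a valid Python index into plane[0].
def Pre_SortDept (min : Int) (max : Int) (d : Int) (surface : List (List (List Int))) : Prop :=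
  min ≤ max → ∀ plane ∈ surface, plane ≠ [] ∧ PySem.Raise.InRange (plane.headD []).length d
instance (min : Int) (max : Int) (d : Int) (surface : List (List (List Int))) : Decidable (Pre_SortDept min max d surface) := by unfold Pre_SortDept; infer_instance

def pvWitness_SortDept : Int × Int × Int × List (List (List Int)) := (0, 1, 0, [[[1, 2]], [[0]]])

def Spec_SortDept (min : Int) (max : Int) (d : Int) (surface : List (List (List Int))) (out : List (List (List Int))) : Prop := out = SortDept_alt min max d surface
instance (min : Int) (max : Int) (d : Int) (surface : List (List (List Int))) (out : List (List (List Int))) : Decidable (Spec_SortDept min max d surface out) := by unfold Spec_SortDept; infer_instance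

-- ===== CLAIM (what is proved, stated in full; the proofs are below) =====
def Claim_equal_SortDept : Prop := ∀ (min : Int) (max : Int) (d : Int) (surface : List (List (List Int))), Dom_SortDept min max d surface → Pre_SortDept min max d surface → Spec_SortDept min max d surface (SortDept min max d surface)

-- ===== LEMMAS AND PROOFS =====

-- the bucket for a given dept holds exactly the planes whose key is dept, in surface order
theorem getD_sortDeptBuckets_aux (d : Int) (surface : List (List (List Int)))
    (dict : PySem.Dict Int (List (List (List Int)))) (c : Int) :
    (surface.foldl (fun buckets plane =>
      match pvKey_SortDept d plane with
      | some k => buckets.modify k [] (· ++ [plane])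
      | none => buckets) dict).getD c []
      = dict.getD c [] ++ surface.filter (fun plane => pvKey_SortDept d plane == some c) := by
  induction surface generalizing dict with
  | nil => simp
  | cons p ps ih =>
      simp only [List.foldl_cons, List.filter_cons]
      cases hk : pvKey_SortDept d p with
      | none => simp [ih]
      | some k =>
          rw [ih]
          rw [PySem.Dict.getD_modify]
          by_cases hc : c = k
          · simp [hc]
          · simp [hc, Ne.symm hc]

theorem getD_sortDeptBuckets (d : Int) (surface : List (List (List Int))) (c : Int) :
    (SortDeptBuckets d surface).getD c []
      = surface.filter (fun plane => pvKey_SortDept d plane == some c) := by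
  unfold SortDeptBuckets
  rw [getD_sortDeptBuckets_aux]
  simp

theorem loops_eq (d : Int) (surface : List (List (List Int))) (dept : Int) (fuel : Nat)
    (sort : List (List (List Int))) :
    SortDeptLoopA d surface dept fuel sort
      = SortDeptLoopB (SortDeptBuckets d surface) dept fuel sort := by
  induction fuel generalizing dept sort with
  | zero => rfl
  | succ f ih =>
      simp only [SortDeptLoopA, SortDeptLoopB]
      rw [PySem.List.foldl_append_if_eq_filter, ih, getD_sortDeptBuckets]

-- ===== VERDICT (by name: the statement is the Claim_ definition above) =====
theorem SortDept_spec : Claim_equal_SortDept := by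
  intro min max d surface _ _
  unfold Spec_SortDept SortDept SortDept_alt
  by_cases h : max < min
  · have : (max - min + 1).toNat = 0 := by omega
    simp [h, this, SortDeptLoopA]
  · simp only [h, if_false]
    exact loops_eq d surface max _ []
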